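-- pv_equiv track=rewrite | github.com/amandamiskiewicz/DPTO | Mountains_of_Hoiyama.py | mountains_of_hoiyama
-- ===== SOURCE A (Python) =====
-- def mountains_of_hoiyama(width):
--     weight=0
--     prev_number=0
--     row_number=1
--     for i in range(width,0,-2):
--         weight+=row_number*i+prev_number
--         prev_number+=row_number
--         row_number+=2
--     return weight
-- ===== SOURCE B (Python) =====
-- def mountains_of_hoiyama(width):
--     if width <= 0:
--         return 0
--     n = (width + 1) // 2  # number of loop iterations in the naive version
--     s1 = n * (n - 1) // 2
--     s2 = (n - 1) * n * (2 * n - 1) // 6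
--     return n * width + (2 * width - 2) * s1 - 3 * s2
-- ===== Notes on version B (the rewrite author's own statement) =====
-- stated objective: faster
-- what changed: Replaces the O(width) accumulation loop over range(width,0,-2) with a closed-form polynomial in the iteration count n = ceil(width/2), using exact triangular and square-pyramidal sums.
import Mathlib
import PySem

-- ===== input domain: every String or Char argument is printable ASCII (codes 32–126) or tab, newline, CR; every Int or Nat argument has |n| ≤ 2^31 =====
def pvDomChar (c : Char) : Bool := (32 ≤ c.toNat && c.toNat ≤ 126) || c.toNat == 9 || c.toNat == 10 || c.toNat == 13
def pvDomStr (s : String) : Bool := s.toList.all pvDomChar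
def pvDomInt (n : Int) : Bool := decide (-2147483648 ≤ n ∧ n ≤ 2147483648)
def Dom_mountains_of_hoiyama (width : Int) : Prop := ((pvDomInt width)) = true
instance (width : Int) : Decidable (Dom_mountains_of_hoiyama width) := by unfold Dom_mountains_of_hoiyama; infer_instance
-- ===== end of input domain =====

-- B replaces A's O(width) accumulation loop with a closed-form polynomial in the
-- iteration count n = ceil(width/2) (objective: faster, asymptotic O(1) vs O(width)).


-- ===== PORT A =====
-- literal port of A: fold the loop body over range(width, 0, -2) with state
-- (weight, prev_number, row_number)
def mountains_of_hoiyama (width : Int) : Int :=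
  (((PySem.List.pyRange width 0 (-2)).foldl
      (fun (st : Int × Int × Int) (i : Int) =>
        (st.1 + st.2.2 * i + st.2.1, st.2.1 + st.2.2, st.2.2 + 2))
      (0, 0, 1))).1

-- ===== PORT B =====
-- literal port of Source B: closed-form summation, n = (width + 1) // 2 iterations
def mountains_of_hoiyama_alt (width : Int) : Int :=
  if width ≤ 0 then 0
  else
    let n := PySem.Int.floordiv (width + 1) 2
    let s1 := PySem.Int.floordiv (n * (n - 1)) 2
    let s2 := PySem.Int.floordiv ((n - 1) * n * (2 * n - 1)) 6
    n * width + (2 * width - 2) * s1 - 3 * s2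

-- ===== PRECONDITION & SPEC =====
def Spec_mountains_of_hoiyama (width : Int) (out : Int) : Prop := out = mountains_of_hoiyama_alt width
instance (width : Int) (out : Int) : Decidable (Spec_mountains_of_hoiyama width out) := by unfold Spec_mountains_of_hoiyama; infer_instance

-- ===== CLAIM (what is proved, stated in full; the proofs are below) =====
def Claim_equal_mountains_of_hoiyama : Prop := ∀ (width : Int), Dom_mountains_of_hoiyama width → Spec_mountains_of_hoiyama width (mountains_of_hoiyama width)

-- ===== LEMMAS AND PROOFS =====

-- exact value of the loop sum: F n m = Σ_{k<n} ((2k+1)(m-2k) + k²), defined recursively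
def pvF (m : Int) : ℕ → Int
  | 0 => 0
  | n + 1 => pvF m n + (2 * (n : Int) + 1) * (m - 2 * n) + (n : Int) * n

-- loop invariant: after n iterations the state is (pvF m n, n², 2n+1)
theorem pvLoopA (m : Int) (n : ℕ) :
    ((List.range n).map (fun (k : ℕ) => m + (-2) * (k : Int))).foldl
      (fun (st : Int × Int × Int) (i : Int) =>
        (st.1 + st.2.2 * i + st.2.1, st.2.1 + st.2.2, st.2.2 + 2))
      (0, 0, 1)
    = (pvF m n, (n : Int) * n, 2 * (n : Int) + 1) := by
  induction n with
  | zero => simp [pvF]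
  | succ n ih =>
      rw [List.range_succ, List.map_append, List.foldl_append, ih]
      simp only [List.map_cons, List.map_nil, List.foldl_cons, List.foldl_nil, pvF]
      push_cast
      simp only [Prod.mk.injEq]
      refine ⟨by ring, by ring, by ring⟩

-- six times the loop sum, in closed form
theorem pvF_six (m : Int) (n : ℕ) :
    6 * pvF m n = 6 * n * m + 6 * (m - 1) * n * ((n : Int) - 1)
      - 3 * ((n : Int) - 1) * n * (2 * n - 1) := by
  induction n with
  | zero => simp [pvF]
  | succ n ih =>
      simp only [pvF]
      push_cast
      linear_combination ih

-- 6 ∣ (n-1)·n·(2n-1)  (over ℕ, witness constructed by induction)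
theorem pvSixDvd (n : ℕ) : ∃ q : ℕ, (n - 1) * n * (2 * n - 1) = 6 * q := by
  induction n with
  | zero => exact ⟨0, rfl⟩
  | succ n ih =>
      obtain ⟨q, hq⟩ := ih
      refine ⟨q + n * n, ?_⟩
      cases n with
      | zero => omega
      | succ k =>
          simp only [Nat.add_sub_cancel] at hq ⊢
          have h2 : 2 * (k + 1) - 1 = 2 * k + 1 := by omega
          have h3 : 2 * (k + 1 + 1) - 1 = 2 * k + 3 := by omega
          rw [h3]
          rw [h2] at hq
          nlinarith [hq]

theorem mountains_of_hoiyama_eq (width : Int) :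
    mountains_of_hoiyama width = mountains_of_hoiyama_alt width := by
  unfold mountains_of_hoiyama mountains_of_hoiyama_alt
  rw [PySem.List.pyRange]
  by_cases h : width ≤ 0
  · have : ¬ ((0 : Int) < width) := by omega
    simp [this, h]
  · have hw : (0 : Int) < width := by omega
    have hlt : (0 : Int) < width := hw
    simp only [if_neg (by norm_num : ¬ ((-2 : Int) = 0)), if_neg (by omega : ¬ (0 : Int) < (-2 : Int)), if_pos hlt]
    have harith : (width - 0 + -(-2) - 1) / -(-2) = (width + 1) / 2 := by norm_num; omega
    rw [harith]
    set n : ℕ := ((width + 1) / 2).toNat with hn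
    have hN : PySem.Int.floordiv (width + 1) 2 = (n : Int) := by
      rw [PySem.Int.floordiv_eq_ediv_of_pos (by norm_num)]
      omega
    rw [pvLoopA width n]
    simp only [if_neg h, hN]
    have hn1 : 1 ≤ n := by omega
    -- s1 is an exact division
    obtain ⟨q1, hq1⟩ : ∃ q : Int, (n : Int) * ((n : Int) - 1) = 2 * q := by
      rcases Int.even_mul_succ_self ((n : Int) - 1) with ⟨q, hq⟩
      exact ⟨q, by linarith [hq]⟩
    -- s2 is an exact division
    obtain ⟨q2n, hq2n⟩ := pvSixDvd n
    have hq2 : ((n : Int) - 1) * n * (2 * n - 1) = 6 * (q2n : Int) := by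
      have h1 : ((n - 1 : ℕ) : Int) = (n : Int) - 1 := by omega
      have h2 : ((2 * n - 1 : ℕ) : Int) = 2 * (n : Int) - 1 := by omega
      calc ((n : Int) - 1) * n * (2 * n - 1)
          = ((n - 1 : ℕ) : Int) * ((n : ℕ) : Int) * ((2 * n - 1 : ℕ) : Int) := by rw [h1, h2]
        _ = (((n - 1) * n * (2 * n - 1) : ℕ) : Int) := by push_cast; ring
        _ = 6 * (q2n : Int) := by rw [hq2n]; push_cast; ring
    have hs1 : PySem.Int.floordiv ((n : Int) * ((n : Int) - 1)) 2 = q1 := by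
      rw [hq1, PySem.Int.floordiv_eq_ediv_of_pos (by norm_num)]
      omega
    have hs2 : PySem.Int.floordiv (((n : Int) - 1) * n * (2 * n - 1)) 6 = (q2n : Int) := by
      rw [hq2, PySem.Int.floordiv_eq_ediv_of_pos (by norm_num)]
      omega
    rw [hs1, hs2]
    have h6 := pvF_six width n
    have hB : 6 * ((n : Int) * width + (2 * width - 2) * q1 - 3 * q2n)
        = 6 * n * width + 6 * (width - 1) * n * ((n : Int) - 1)
          - 3 * ((n : Int) - 1) * n * (2 * n - 1) := by
      linear_combination (-6 * (width - 1)) * hq1 + 3 * hq2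
    omega

-- ===== VERDICT (by name: the statement is the Claim_ definition above) =====
theorem mountains_of_hoiyama_spec : Claim_equal_mountains_of_hoiyama := by
  intro width _
  unfold Spec_mountains_of_hoiyama
  exact mountains_of_hoiyama_eq width
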